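-- pv_equiv track=rewrite | github.com/Cris11212304/GovernanceAgent | dictionary/pipeline/validator.py | _java_to_python_date_format
-- ===== SOURCE A (Python) =====
-- def _java_to_python_date_format(java_fmt: str) -> str:
--     """Convert Java-style date format to Python strftime format."""
--     mapping = {
--         "yyyy": "%Y",
--         "MM": "%m",
--         "dd": "%d",
--         "HH": "%H",
--         "mm": "%M",
--         "ss": "%S",
--     }
--     result = java_fmt
--     for java, py in mapping.items():
--         result = result.replace(java, py)
--     return result
-- ===== SOURCE B (Python) =====
-- def _java_to_python_date_format(java_fmt: str) -> str:
--     """Convert Java-style date format to Python strftime format in one left-to-right scan."""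
--     out = []
--     i = 0
--     n = len(java_fmt)
--     while i < n:
--         if java_fmt.startswith("yyyy", i):
--             out.append("%Y"); i += 4
--         elif java_fmt.startswith("MM", i):
--             out.append("%m"); i += 2
--         elif java_fmt.startswith("dd", i):
--             out.append("%d"); i += 2
--         elif java_fmt.startswith("HH", i):
--             out.append("%H"); i += 2
--         elif java_fmt.startswith("mm", i):
--             out.append("%M"); i += 2
--         elif java_fmt.startswith("ss", i):
--             out.append("%S"); i += 2
--         else:
--             out.append(java_fmt[i]); i += 1
--     return "".join(out)
-- ===== Notes on version B (the rewrite author's own statement) =====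
-- stated objective: alternative
-- what changed: Replaces A's six sequential whole-string str.replace passes with a single left-to-right scan that at each position matches one token (yyyy first) via startswith and otherwise emits the literal character.
-- intended difference: On inputs containing a maximal even-length run of 'M' immediately followed by 'm', A's later mm-pass re-matches the 'm' of an already-emitted '%m' (A('MMm') = '%%M'); B returns '%mm', the intended translation of MM followed by a literal m. — e.g. on _java_to_python_date_format("MMm"): A returns "%%M", B returns "%mm"
import Mathlib
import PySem

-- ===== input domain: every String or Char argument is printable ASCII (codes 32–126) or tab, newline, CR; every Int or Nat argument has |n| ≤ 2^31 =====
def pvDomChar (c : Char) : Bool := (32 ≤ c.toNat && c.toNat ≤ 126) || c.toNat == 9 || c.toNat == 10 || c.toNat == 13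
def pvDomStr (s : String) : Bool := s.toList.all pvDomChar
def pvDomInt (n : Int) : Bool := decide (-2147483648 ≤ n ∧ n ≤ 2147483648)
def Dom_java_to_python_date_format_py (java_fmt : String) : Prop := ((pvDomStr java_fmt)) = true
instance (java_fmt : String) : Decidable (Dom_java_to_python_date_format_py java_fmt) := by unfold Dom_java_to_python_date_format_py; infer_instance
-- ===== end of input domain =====

-- B replaces A's six sequential str.replace passes with one left-to-right token scan (objective: alternative);
-- on even M-runs followed by 'm' A's mm-pass re-matches the 'm' of an emitted '%m', B emits the intended
-- '%m' + literal 'm' — stated as the intended difference D_ below.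

-- ===== PORT A =====
def java_to_python_date_format_py (java_fmt : String) : String :=
  let mapping : PySem.Dict String String :=
    PySem.Dict.ofList [("yyyy", "%Y"), ("MM", "%m"), ("dd", "%d"), ("HH", "%H"), ("mm", "%M"), ("ss", "%S")]
  mapping.items.foldl (fun result p => PySem.Str.replace result p.1 p.2) java_fmt

-- ===== PORT B =====
-- single left-to-right scan: the if-chain is B's startswith chain, one branch per token
def jptOnePass : List Char → List Char
  | [] => []
  | c :: t =>
    if List.isPrefixOf ['y','y','y','y'] (c :: t) then '%' :: 'Y' :: jptOnePass (t.drop 3)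
    else if List.isPrefixOf ['M','M'] (c :: t) then '%' :: 'm' :: jptOnePass (t.drop 1)
    else if List.isPrefixOf ['d','d'] (c :: t) then '%' :: 'd' :: jptOnePass (t.drop 1)
    else if List.isPrefixOf ['H','H'] (c :: t) then '%' :: 'H' :: jptOnePass (t.drop 1)
    else if List.isPrefixOf ['m','m'] (c :: t) then '%' :: 'M' :: jptOnePass (t.drop 1)
    else if List.isPrefixOf ['s','s'] (c :: t) then '%' :: 'S' :: jptOnePass (t.drop 1)
    else c :: jptOnePass t
termination_by l => l.length
decreasing_by all_goals (simp [List.length_drop]; try omega)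

def java_to_python_date_format_py_alt (java_fmt : String) : String :=
  String.ofList (jptOnePass java_fmt.toList)

-- ===== PRECONDITION & SPEC =====
-- scanner for D_: counts the current run of 'M'; an 'm' right after a nonempty even run marks the input
def jptMRun : List Char → Nat → Bool
  | [], _ => false
  | c :: t, k =>
    if c = 'M' then jptMRun t (k + 1)
    else if c = 'm' ∧ k ≠ 0 ∧ k % 2 = 0 then true
    else jptMRun t 0

-- On inputs containing a maximal even-length run of 'M' immediately followed by 'm', A's later mm-pass
-- re-matches the 'm' of an emitted '%m' (A "MMm" = "%%M"); B returns "%mm", the intended translation.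
def D_java_to_python_date_format_py (java_fmt : String) : Prop := jptMRun java_fmt.toList 0 = true
instance (java_fmt : String) : Decidable (D_java_to_python_date_format_py java_fmt) := by
  unfold D_java_to_python_date_format_py; infer_instance

def Spec_java_to_python_date_format_py (java_fmt : String) (out : String) : Prop :=
  ¬ D_java_to_python_date_format_py java_fmt → out = java_to_python_date_format_py_alt java_fmt
instance (java_fmt : String) (out : String) : Decidable (Spec_java_to_python_date_format_py java_fmt out) := by
  unfold Spec_java_to_python_date_format_py; infer_instance

def pvDiffWitness_java_to_python_date_format_py : String := "MMm"
def pvDiffWitnessOut_java_to_python_date_format_py : String × String := ("%%M", "%mm")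

-- ===== CLAIM (what is proved, stated in full; the proofs are below) =====
def Claim_unchanged_java_to_python_date_format_py : Prop := ∀ (java_fmt : String), Dom_java_to_python_date_format_py java_fmt → Spec_java_to_python_date_format_py java_fmt (java_to_python_date_format_py java_fmt)
def Claim_changed_java_to_python_date_format_py : Prop := Dom_java_to_python_date_format_py (pvDiffWitness_java_to_python_date_format_py) ∧ D_java_to_python_date_format_py (pvDiffWitness_java_to_python_date_format_py) ∧ java_to_python_date_format_py (pvDiffWitness_java_to_python_date_format_py) = pvDiffWitnessOut_java_to_python_date_format_py.1 ∧ java_to_python_date_format_py_alt (pvDiffWitness_java_to_python_date_format_py) = pvDiffWitnessOut_java_to_python_date_format_py.2 ∧ pvDiffWitnessOut_java_to_python_date_format_py.1 ≠ pvDiffWitnessOut_java_to_python_date_format_py.2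

def Claim_exact_java_to_python_date_format_py : Prop := ∀ (java_fmt : String), Dom_java_to_python_date_format_py java_fmt → D_java_to_python_date_format_py java_fmt → java_to_python_date_format_py java_fmt ≠ java_to_python_date_format_py_alt java_fmt

-- ===== LEMMAS AND PROOFS =====

-- fuel-free rendering of Python's str.replace (leftmost, non-overlapping)
def repK (pat rep : List Char) : List Char → List Char
  | [] => []
  | c :: t =>
    if List.isPrefixOf pat (c :: t) then rep ++ repK pat rep (t.drop (pat.length - 1))
    else c :: repK pat rep t
termination_by l => l.length
decreasing_by all_goals (simp [List.length_drop]; try omega)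

theorem go_eq_repK (pat rep : List Char) (hp : pat ≠ []) :
    ∀ (fuel : Nat) (l acc : List Char), l.length ≤ fuel →
      PySem.Chars.replace.go pat rep fuel l acc = acc.reverse ++ repK pat rep l := by
  intro fuel
  induction fuel with
  | zero =>
    intro l acc hl
    have h0 : l = [] := List.eq_nil_of_length_eq_zero (Nat.le_zero.mp hl)
    subst h0
    rw [PySem.Chars.replace.go.eq_def]
    simp [repK]
  | succ n ih =>
    intro l acc hl
    match l with
    | [] =>
      rw [PySem.Chars.replace.go.eq_def]
      simp [repK]
    | c :: t =>
      have ht : t.length ≤ n := by simpa using hl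
      have hplen : 1 ≤ pat.length := List.length_pos_of_ne_nil hp
      rw [PySem.Chars.replace.go.eq_def, repK]
      show (if pat.isPrefixOf (c :: t) = true then
              PySem.Chars.replace.go pat rep n (List.drop pat.length (c :: t)) (rep.reverse ++ acc)
            else PySem.Chars.replace.go pat rep n t (c :: acc)) = _
      by_cases h : List.isPrefixOf pat (c :: t) = true
      · simp only [h, if_true]
        have hdrop : List.drop pat.length (c :: t) = t.drop (pat.length - 1) := by
          obtain ⟨m, hm⟩ : ∃ m, pat.length = m + 1 := ⟨pat.length - 1, by omega⟩
          rw [hm]; simp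
        rw [hdrop, ih _ _ (by simp [List.length_drop]; omega)]
        simp
      · simp only [h]
        rw [ih _ _ ht]
        simp

theorem replace_eq_repK (s pat rep : List Char) (hp : pat ≠ []) :
    PySem.Chars.replace s pat rep = repK pat rep s := by
  rw [PySem.Chars.replace]
  rw [if_neg (by simpa using hp)]
  simpa using go_eq_repK pat rep hp s.length s [] le_rfl

-- the six passes of A
def jptRY : List Char → List Char := repK ['y','y','y','y'] ['%','Y']
def jptRM : List Char → List Char := repK ['M','M'] ['%','m']
def jptRd : List Char → List Char := repK ['d','d'] ['%','d']
def jptRH : List Char → List Char := repK ['H','H'] ['%','H']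
def jptRm : List Char → List Char := repK ['m','m'] ['%','M']
def jptRs : List Char → List Char := repK ['s','s'] ['%','S']
def jptChain (l : List Char) : List Char := jptRs (jptRm (jptRH (jptRd (jptRM (jptRY l)))))

theorem repK_skip (pat rep : List Char) (c : Char) (t : List Char)
    (h : List.isPrefixOf pat (c :: t) = false) :
    repK pat rep (c :: t) = c :: repK pat rep t := by
  rw [repK]; simp [h]

theorem prefix_cons_ne (a c : Char) (p t : List Char) (h : a ≠ c) :
    List.isPrefixOf (a :: p) (c :: t) = false := by
  simp [List.isPrefixOf, h]

theorem repK_skip2 (p1 : Char) (prest rep : List Char) (a b : Char) (Z : List Char)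
    (h1 : p1 ≠ a) (h2 : p1 ≠ b) :
    repK (p1 :: prest) rep (a :: b :: Z) = a :: b :: repK (p1 :: prest) rep Z := by
  rw [repK_skip _ _ _ _ (prefix_cons_ne _ _ _ _ h1),
      repK_skip _ _ _ _ (prefix_cons_ne _ _ _ _ h2)]

theorem prefix2_false (a : Char) (X : List Char) (h : X.head? ≠ some a) :
    List.isPrefixOf [a, a] (a :: X) = false := by
  cases X with
  | nil => simp [List.isPrefixOf]
  | cons x xs =>
    have hx : x ≠ a := by intro he; exact h (by simp [he])
    simp [List.isPrefixOf, Ne.symm hx]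

theorem repK2_match (a : Char) (rep t : List Char) :
    repK [a, a] rep (a :: a :: t) = rep ++ repK [a, a] rep t := by
  rw [repK]; simp [List.isPrefixOf]

theorem repK2_skip_head (a : Char) (rep X : List Char) (h : X.head? ≠ some a) :
    repK [a, a] rep (a :: X) = a :: repK [a, a] rep X :=
  repK_skip _ _ _ _ (prefix2_false a X h)

theorem repK_head (pat : List Char) (r1 r2 : Char) (t : List Char) :
    (repK pat [r1, r2] t).head? = some r1 ∨ (repK pat [r1, r2] t).head? = t.head? := by
  cases t with
  | nil => right; rw [repK]
  | cons c u =>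
    rw [repK]
    by_cases h : List.isPrefixOf pat (c :: u) = true
    · left; simp [h]
    · right; simp [h]

theorem prefix2_lift (a c : Char) (t X : List Char) (ha : a ≠ '%')
    (h : List.isPrefixOf [a, a] (c :: t) = false)
    (hX : X.head? = some '%' ∨ X.head? = t.head?) :
    List.isPrefixOf [a, a] (c :: X) = false := by
  by_cases hc : a = c
  · subst hc
    have ht : t.head? ≠ some a := by
      intro he
      cases t with
      | nil => simp at he
      | cons d u =>
        have hd : d = a := by injection he
        subst hd
        simp [List.isPrefixOf] at h
    apply prefix2_false
    rcases hX with hX | hX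
    · rw [hX]; intro he; exact ha (by injection he with h'; exact h'.symm) |>.elim
    · rw [hX]; exact ht
  · exact prefix_cons_ne _ _ _ _ hc

-- jptMRun facts
theorem jptMRun_mono : ∀ (t : List Char) (j k : Nat), j ≤ k → j % 2 = k % 2 →
    jptMRun t k = false → jptMRun t j = false := by
  intro t
  induction t with
  | nil => intro j k _ _ _; rw [jptMRun]
  | cons c u ih =>
    intro j k hle hpar h
    rw [jptMRun] at h ⊢
    by_cases hM : c = 'M'
    · simp only [hM, if_pos] at h ⊢
      exact ih (j + 1) (k + 1) (by omega) (by omega) h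
    · simp only [if_neg hM] at h ⊢
      by_cases hj : c = 'm' ∧ j ≠ 0 ∧ j % 2 = 0
      · exfalso
        have hk : c = 'm' ∧ k ≠ 0 ∧ k % 2 = 0 := ⟨hj.1, by omega, by omega⟩
        simp [hk] at h
      · simp only [if_neg hj]
        by_cases hk : c = 'm' ∧ k ≠ 0 ∧ k % 2 = 0
        · simp [hk] at h
        · simp only [if_neg hk] at h; exact h

theorem jptMRun_one (t : List Char) (h : t.head? ≠ some 'M') :
    jptMRun t 1 = jptMRun t 0 := by
  cases t with
  | nil => rfl
  | cons c u =>
    have hM : c ≠ 'M' := by intro he; exact h (by simp [he])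
    rw [jptMRun, jptMRun]
    simp [hM]

theorem jptMRun_tail_eq (c : Char) (t : List Char)
    (hMM : List.isPrefixOf ['M','M'] (c :: t) = false) :
    jptMRun (c :: t) 0 = jptMRun t 0 := by
  rw [jptMRun]
  by_cases hM : c = 'M'
  · simp only [hM, if_pos]
    have ht : t.head? ≠ some 'M' := by
      cases t with
      | nil => simp
      | cons d u =>
        intro he
        have hd : d = 'M' := by injection he
        subst hd
        subst hM
        simp [List.isPrefixOf] at hMM
    exact jptMRun_one t ht
  · simp [hM]

theorem jptMRun_pos : ∀ (u : List Char) (j k : Nat), 0 < j → 0 < k → j % 2 = k % 2 →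
    jptMRun u j = jptMRun u k := by
  intro u
  induction u with
  | nil => intro j k _ _ _; rw [jptMRun, jptMRun]
  | cons c w ih =>
    intro j k hj hk hpar
    rw [jptMRun, jptMRun]
    by_cases hM : c = 'M'
    · simp only [hM, if_pos]
      exact ih (j + 1) (k + 1) (by omega) (by omega) (by omega)
    · simp only [if_neg hM]
      by_cases hm : c = 'm'
      · by_cases hpj : j % 2 = 0
        · have hcj : c = 'm' ∧ j ≠ 0 ∧ j % 2 = 0 := ⟨hm, by omega, hpj⟩
          have hck : c = 'm' ∧ k ≠ 0 ∧ k % 2 = 0 := ⟨hm, by omega, by omega⟩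
          simp [hcj, hck]
        · have hcj : ¬ (c = 'm' ∧ j ≠ 0 ∧ j % 2 = 0) := by rintro ⟨_, _, hh⟩; omega
          have hck : ¬ (c = 'm' ∧ k ≠ 0 ∧ k % 2 = 0) := by rintro ⟨_, _, hh⟩; omega
          simp [hcj, hck]
      · have hcj : ¬ (c = 'm' ∧ j ≠ 0 ∧ j % 2 = 0) := by rintro ⟨hh, _, _⟩; exact hm hh
        have hck : ¬ (c = 'm' ∧ k ≠ 0 ∧ k % 2 = 0) := by rintro ⟨hh, _, _⟩; exact hm hh
        simp [hcj, hck]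

theorem jptMRun_two (u : List Char) (h : u.head? ≠ some 'm') :
    jptMRun u 2 = jptMRun u 0 := by
  cases u with
  | nil => rw [jptMRun, jptMRun]
  | cons c w =>
    have hm : c ≠ 'm' := by intro he; exact h (by simp [he])
    rw [jptMRun, jptMRun]
    by_cases hM : c = 'M'
    · simp only [hM, if_pos]
      exact jptMRun_pos w 3 1 (by omega) (by omega) (by omega)
    · simp [hM, hm]

theorem head_or_trans {t X Y : List Char}
    (h1 : Y.head? = some '%' ∨ Y.head? = X.head?)
    (h2 : X.head? = some '%' ∨ X.head? = t.head?) :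
    Y.head? = some '%' ∨ Y.head? = t.head? := by
  rcases h1 with h1 | h1
  · exact Or.inl h1
  · rw [h1]; exact h2

-- head of the first four passes is '%' or the original head
theorem chain4_head (t : List Char) :
    (jptRH (jptRd (jptRM (jptRY t)))).head? = some '%' ∨
    (jptRH (jptRd (jptRM (jptRY t)))).head? = t.head? := by
  unfold jptRH jptRd jptRM jptRY
  exact head_or_trans (repK_head _ _ _ _)
    (head_or_trans (repK_head _ _ _ _)
      (head_or_trans (repK_head _ _ _ _) (repK_head _ _ _ _)))

theorem chain4_head_ne (t : List Char) (c : Char) (hc : c ≠ '%') (ht : t.head? ≠ some c) :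
    (jptRH (jptRd (jptRM (jptRY t)))).head? ≠ some c := by
  rcases chain4_head t with h | h <;> rw [h]
  · intro he; exact hc (by injection he with h'; exact h'.symm)
  · exact ht

-- MAIN LEMMA: outside D_, A's six-pass chain equals B's single pass
theorem jptChain_eq_onePass (l : List Char) (h : jptMRun l 0 = false) :
    jptChain l = jptOnePass l := by
  cases l with
  | nil => simp [jptChain, jptRY, jptRM, jptRd, jptRH, jptRm, jptRs, repK, jptOnePass]
  | cons c t =>
    by_cases h1 : List.isPrefixOf ['y','y','y','y'] (c :: t) = true
    · -- yyyy at the front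
      obtain ⟨u, rfl, rfl⟩ : ∃ u, c = 'y' ∧ t = 'y' :: 'y' :: 'y' :: u := by
        cases t with
        | nil => simp [List.isPrefixOf] at h1
        | cons a t' => cases t' with
          | nil => simp [List.isPrefixOf] at h1
          | cons b t'' => cases t'' with
            | nil => simp [List.isPrefixOf] at h1
            | cons d t3 =>
              simp [List.isPrefixOf] at h1
              obtain ⟨e1, e2, e3, e4⟩ := h1
              exact ⟨t3, e1.symm, by rw [← e2, ← e3, ← e4]⟩
      have hu : jptMRun u 0 = false := by
        rw [jptMRun, jptMRun, jptMRun, jptMRun] at h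
        simpa using h
      have eY : jptRY ('y' :: 'y' :: 'y' :: 'y' :: u) = '%' :: 'Y' :: jptRY u := by
        unfold jptRY; rw [repK]; simp [List.isPrefixOf]
      have := jptChain_eq_onePass u hu
      rw [jptOnePass, if_pos h1]
      simp only [List.drop_succ_cons, List.drop_zero]
      rw [← this]
      unfold jptChain
      rw [eY]
      rw [show jptRM ('%' :: 'Y' :: jptRY u) = '%' :: 'Y' :: jptRM (jptRY u) from
            repK_skip2 _ _ _ _ _ _ (by decide) (by decide)]
      rw [show jptRd ('%' :: 'Y' :: jptRM (jptRY u)) = '%' :: 'Y' :: jptRd (jptRM (jptRY u)) from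
            repK_skip2 _ _ _ _ _ _ (by decide) (by decide)]
      rw [show jptRH ('%' :: 'Y' :: jptRd (jptRM (jptRY u))) = '%' :: 'Y' :: jptRH (jptRd (jptRM (jptRY u))) from
            repK_skip2 _ _ _ _ _ _ (by decide) (by decide)]
      rw [show jptRm ('%' :: 'Y' :: jptRH (jptRd (jptRM (jptRY u)))) = '%' :: 'Y' :: jptRm (jptRH (jptRd (jptRM (jptRY u)))) from
            repK_skip2 _ _ _ _ _ _ (by decide) (by decide)]
      rw [show jptRs ('%' :: 'Y' :: jptRm (jptRH (jptRd (jptRM (jptRY u))))) = '%' :: 'Y' :: jptRs (jptRm (jptRH (jptRd (jptRM (jptRY u))))) from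
            repK_skip2 _ _ _ _ _ _ (by decide) (by decide)]
    · by_cases h2 : List.isPrefixOf ['M','M'] (c :: t) = true
      · -- MM at the front
        obtain ⟨u, rfl, rfl⟩ : ∃ u, c = 'M' ∧ t = 'M' :: u := by
          cases t with
          | nil => simp [List.isPrefixOf] at h2
          | cons a t' =>
            simp [List.isPrefixOf] at h2
            obtain ⟨e1, e2⟩ := h2
            exact ⟨t', e1.symm, by rw [← e2]⟩
        have h2' : jptMRun u 2 = false := by
          rw [jptMRun, jptMRun] at h
          simpa using h
        have hu : jptMRun u 0 = false := jptMRun_mono u 0 2 (by omega) (by omega) h2'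
        have hum : u.head? ≠ some 'm' := by
          cases u with
          | nil => simp
          | cons d v =>
            intro he
            have hd : d = 'm' := by injection he
            subst hd
            rw [jptMRun] at h2'
            simp at h2'
        have hY : (jptRH (jptRd (jptRM (jptRY u)))).head? ≠ some 'm' :=
          chain4_head_ne u 'm' (by decide) hum
        have := jptChain_eq_onePass u hu
        rw [jptOnePass, if_neg h1, if_pos h2]
        simp only [List.drop_succ_cons, List.drop_zero]
        rw [← this]
        unfold jptChain
        rw [show jptRY ('M' :: 'M' :: u) = 'M' :: 'M' :: jptRY u from
              repK_skip2 _ _ _ _ _ _ (by decide) (by decide)]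
        rw [show jptRM ('M' :: 'M' :: jptRY u) = '%' :: 'm' :: jptRM (jptRY u) from
              repK2_match _ _ _]
        rw [show jptRd ('%' :: 'm' :: jptRM (jptRY u)) = '%' :: 'm' :: jptRd (jptRM (jptRY u)) from
              repK_skip2 _ _ _ _ _ _ (by decide) (by decide)]
        rw [show jptRH ('%' :: 'm' :: jptRd (jptRM (jptRY u))) = '%' :: 'm' :: jptRH (jptRd (jptRM (jptRY u))) from
              repK_skip2 _ _ _ _ _ _ (by decide) (by decide)]
        rw [show jptRm ('%' :: 'm' :: jptRH (jptRd (jptRM (jptRY u)))) = '%' :: 'm' :: jptRm (jptRH (jptRd (jptRM (jptRY u)))) from by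
              unfold jptRm
              rw [repK_skip _ _ _ _ (prefix_cons_ne _ _ _ _ (by decide)),
                  repK2_skip_head _ _ _ hY]]
        rw [show jptRs ('%' :: 'm' :: jptRm (jptRH (jptRd (jptRM (jptRY u))))) = '%' :: 'm' :: jptRs (jptRm (jptRH (jptRd (jptRM (jptRY u))))) from
              repK_skip2 _ _ _ _ _ _ (by decide) (by decide)]
      · by_cases h3 : List.isPrefixOf ['d','d'] (c :: t) = true
        · obtain ⟨u, rfl, rfl⟩ : ∃ u, c = 'd' ∧ t = 'd' :: u := by
            cases t with
            | nil => simp [List.isPrefixOf] at h3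
            | cons a t' =>
              simp [List.isPrefixOf] at h3
              obtain ⟨e1, e2⟩ := h3
              exact ⟨t', e1.symm, by rw [← e2]⟩
          have hu : jptMRun u 0 = false := by
            rw [jptMRun, jptMRun] at h
            simpa using h
          have := jptChain_eq_onePass u hu
          rw [jptOnePass, if_neg h1, if_neg h2, if_pos h3]
          simp only [List.drop_succ_cons, List.drop_zero]
          rw [← this]
          unfold jptChain
          rw [show jptRY ('d' :: 'd' :: u) = 'd' :: 'd' :: jptRY u from
                repK_skip2 _ _ _ _ _ _ (by decide) (by decide)]
          rw [show jptRM ('d' :: 'd' :: jptRY u) = 'd' :: 'd' :: jptRM (jptRY u) from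
                repK_skip2 _ _ _ _ _ _ (by decide) (by decide)]
          rw [show jptRd ('d' :: 'd' :: jptRM (jptRY u)) = '%' :: 'd' :: jptRd (jptRM (jptRY u)) from
                repK2_match _ _ _]
          rw [show jptRH ('%' :: 'd' :: jptRd (jptRM (jptRY u))) = '%' :: 'd' :: jptRH (jptRd (jptRM (jptRY u))) from
                repK_skip2 _ _ _ _ _ _ (by decide) (by decide)]
          rw [show jptRm ('%' :: 'd' :: jptRH (jptRd (jptRM (jptRY u)))) = '%' :: 'd' :: jptRm (jptRH (jptRd (jptRM (jptRY u)))) from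
                repK_skip2 _ _ _ _ _ _ (by decide) (by decide)]
          rw [show jptRs ('%' :: 'd' :: jptRm (jptRH (jptRd (jptRM (jptRY u))))) = '%' :: 'd' :: jptRs (jptRm (jptRH (jptRd (jptRM (jptRY u))))) from
                repK_skip2 _ _ _ _ _ _ (by decide) (by decide)]
        · by_cases h4 : List.isPrefixOf ['H','H'] (c :: t) = true
          · obtain ⟨u, rfl, rfl⟩ : ∃ u, c = 'H' ∧ t = 'H' :: u := by
              cases t with
              | nil => simp [List.isPrefixOf] at h4
              | cons a t' =>
                simp [List.isPrefixOf] at h4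
                obtain ⟨e1, e2⟩ := h4
                exact ⟨t', e1.symm, by rw [← e2]⟩
            have hu : jptMRun u 0 = false := by
              rw [jptMRun, jptMRun] at h
              simpa using h
            have := jptChain_eq_onePass u hu
            rw [jptOnePass, if_neg h1, if_neg h2, if_neg h3, if_pos h4]
            simp only [List.drop_succ_cons, List.drop_zero]
            rw [← this]
            unfold jptChain
            rw [show jptRY ('H' :: 'H' :: u) = 'H' :: 'H' :: jptRY u from
                  repK_skip2 _ _ _ _ _ _ (by decide) (by decide)]
            rw [show jptRM ('H' :: 'H' :: jptRY u) = 'H' :: 'H' :: jptRM (jptRY u) from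
                  repK_skip2 _ _ _ _ _ _ (by decide) (by decide)]
            rw [show jptRd ('H' :: 'H' :: jptRM (jptRY u)) = 'H' :: 'H' :: jptRd (jptRM (jptRY u)) from
                  repK_skip2 _ _ _ _ _ _ (by decide) (by decide)]
            rw [show jptRH ('H' :: 'H' :: jptRd (jptRM (jptRY u))) = '%' :: 'H' :: jptRH (jptRd (jptRM (jptRY u))) from
                  repK2_match _ _ _]
            rw [show jptRm ('%' :: 'H' :: jptRH (jptRd (jptRM (jptRY u)))) = '%' :: 'H' :: jptRm (jptRH (jptRd (jptRM (jptRY u)))) from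
                  repK_skip2 _ _ _ _ _ _ (by decide) (by decide)]
            rw [show jptRs ('%' :: 'H' :: jptRm (jptRH (jptRd (jptRM (jptRY u))))) = '%' :: 'H' :: jptRs (jptRm (jptRH (jptRd (jptRM (jptRY u))))) from
                  repK_skip2 _ _ _ _ _ _ (by decide) (by decide)]
          · by_cases h5 : List.isPrefixOf ['m','m'] (c :: t) = true
            · obtain ⟨u, rfl, rfl⟩ : ∃ u, c = 'm' ∧ t = 'm' :: u := by
                cases t with
                | nil => simp [List.isPrefixOf] at h5
                | cons a t' =>
                  simp [List.isPrefixOf] at h5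
                  obtain ⟨e1, e2⟩ := h5
                  exact ⟨t', e1.symm, by rw [← e2]⟩
              have hu : jptMRun u 0 = false := by
                rw [jptMRun, jptMRun] at h
                simpa using h
              have := jptChain_eq_onePass u hu
              rw [jptOnePass, if_neg h1, if_neg h2, if_neg h3, if_neg h4, if_pos h5]
              simp only [List.drop_succ_cons, List.drop_zero]
              rw [← this]
              unfold jptChain
              rw [show jptRY ('m' :: 'm' :: u) = 'm' :: 'm' :: jptRY u from
                    repK_skip2 _ _ _ _ _ _ (by decide) (by decide)]
              rw [show jptRM ('m' :: 'm' :: jptRY u) = 'm' :: 'm' :: jptRM (jptRY u) from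
                    repK_skip2 _ _ _ _ _ _ (by decide) (by decide)]
              rw [show jptRd ('m' :: 'm' :: jptRM (jptRY u)) = 'm' :: 'm' :: jptRd (jptRM (jptRY u)) from
                    repK_skip2 _ _ _ _ _ _ (by decide) (by decide)]
              rw [show jptRH ('m' :: 'm' :: jptRd (jptRM (jptRY u))) = 'm' :: 'm' :: jptRH (jptRd (jptRM (jptRY u))) from
                    repK_skip2 _ _ _ _ _ _ (by decide) (by decide)]
              rw [show jptRm ('m' :: 'm' :: jptRH (jptRd (jptRM (jptRY u)))) = '%' :: 'M' :: jptRm (jptRH (jptRd (jptRM (jptRY u)))) from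
                    repK2_match _ _ _]
              rw [show jptRs ('%' :: 'M' :: jptRm (jptRH (jptRd (jptRM (jptRY u))))) = '%' :: 'M' :: jptRs (jptRm (jptRH (jptRd (jptRM (jptRY u))))) from
                    repK_skip2 _ _ _ _ _ _ (by decide) (by decide)]
            · by_cases h6 : List.isPrefixOf ['s','s'] (c :: t) = true
              · obtain ⟨u, rfl, rfl⟩ : ∃ u, c = 's' ∧ t = 's' :: u := by
                  cases t with
                  | nil => simp [List.isPrefixOf] at h6
                  | cons a t' =>
                    simp [List.isPrefixOf] at h6
                    obtain ⟨e1, e2⟩ := h6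
                    exact ⟨t', e1.symm, by rw [← e2]⟩
                have hu : jptMRun u 0 = false := by
                  rw [jptMRun, jptMRun] at h
                  simpa using h
                have := jptChain_eq_onePass u hu
                rw [jptOnePass, if_neg h1, if_neg h2, if_neg h3, if_neg h4, if_neg h5, if_pos h6]
                simp only [List.drop_succ_cons, List.drop_zero]
                rw [← this]
                unfold jptChain
                rw [show jptRY ('s' :: 's' :: u) = 's' :: 's' :: jptRY u from
                      repK_skip2 _ _ _ _ _ _ (by decide) (by decide)]
                rw [show jptRM ('s' :: 's' :: jptRY u) = 's' :: 's' :: jptRM (jptRY u) from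
                      repK_skip2 _ _ _ _ _ _ (by decide) (by decide)]
                rw [show jptRd ('s' :: 's' :: jptRM (jptRY u)) = 's' :: 's' :: jptRd (jptRM (jptRY u)) from
                      repK_skip2 _ _ _ _ _ _ (by decide) (by decide)]
                rw [show jptRH ('s' :: 's' :: jptRd (jptRM (jptRY u))) = 's' :: 's' :: jptRH (jptRd (jptRM (jptRY u))) from
                      repK_skip2 _ _ _ _ _ _ (by decide) (by decide)]
                rw [show jptRm ('s' :: 's' :: jptRH (jptRd (jptRM (jptRY u)))) = 's' :: 's' :: jptRm (jptRH (jptRd (jptRM (jptRY u)))) from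
                      repK_skip2 _ _ _ _ _ _ (by decide) (by decide)]
                rw [show jptRs ('s' :: 's' :: jptRm (jptRH (jptRd (jptRM (jptRY u))))) = '%' :: 'S' :: jptRs (jptRm (jptRH (jptRd (jptRM (jptRY u))))) from
                      repK2_match _ _ _]
              · -- no token matches at this position: emit the literal character
                have h1' : List.isPrefixOf ['y','y','y','y'] (c :: t) = false := by rwa [Bool.not_eq_true] at h1
                have h2' : List.isPrefixOf ['M','M'] (c :: t) = false := by rwa [Bool.not_eq_true] at h2
                have h3' : List.isPrefixOf ['d','d'] (c :: t) = false := by rwa [Bool.not_eq_true] at h3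
                have h4' : List.isPrefixOf ['H','H'] (c :: t) = false := by rwa [Bool.not_eq_true] at h4
                have h5' : List.isPrefixOf ['m','m'] (c :: t) = false := by rwa [Bool.not_eq_true] at h5
                have h6' : List.isPrefixOf ['s','s'] (c :: t) = false := by rwa [Bool.not_eq_true] at h6
                have hu : jptMRun t 0 = false := by rw [← jptMRun_tail_eq c t h2']; exact h
                have hX1 := repK_head ['y','y','y','y'] '%' 'Y' t
                have hX2 : (jptRM (jptRY t)).head? = some '%' ∨ (jptRM (jptRY t)).head? = t.head? :=
                  head_or_trans (repK_head _ _ _ _) hX1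
                have hX3 : (jptRd (jptRM (jptRY t))).head? = some '%' ∨ (jptRd (jptRM (jptRY t))).head? = t.head? :=
                  head_or_trans (repK_head _ _ _ _) hX2
                have hX4 : (jptRH (jptRd (jptRM (jptRY t)))).head? = some '%' ∨ (jptRH (jptRd (jptRM (jptRY t)))).head? = t.head? :=
                  head_or_trans (repK_head _ _ _ _) hX3
                have hX5 : (jptRm (jptRH (jptRd (jptRM (jptRY t))))).head? = some '%' ∨ (jptRm (jptRH (jptRd (jptRM (jptRY t))))).head? = t.head? :=
                  head_or_trans (repK_head _ _ _ _) hX4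
                have := jptChain_eq_onePass t hu
                rw [jptOnePass, if_neg h1, if_neg h2, if_neg h3, if_neg h4, if_neg h5, if_neg h6]
                rw [← this]
                unfold jptChain
                rw [show jptRY (c :: t) = c :: jptRY t from repK_skip _ _ _ _ h1']
                rw [show jptRM (c :: jptRY t) = c :: jptRM (jptRY t) from
                      repK_skip _ _ _ _ (prefix2_lift 'M' c t _ (by decide) h2' hX1)]
                rw [show jptRd (c :: jptRM (jptRY t)) = c :: jptRd (jptRM (jptRY t)) from
                      repK_skip _ _ _ _ (prefix2_lift 'd' c t _ (by decide) h3' hX2)]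
                rw [show jptRH (c :: jptRd (jptRM (jptRY t))) = c :: jptRH (jptRd (jptRM (jptRY t))) from
                      repK_skip _ _ _ _ (prefix2_lift 'H' c t _ (by decide) h4' hX3)]
                rw [show jptRm (c :: jptRH (jptRd (jptRM (jptRY t)))) = c :: jptRm (jptRH (jptRd (jptRM (jptRY t)))) from
                      repK_skip _ _ _ _ (prefix2_lift 'm' c t _ (by decide) h5' hX4)]
                rw [show jptRs (c :: jptRm (jptRH (jptRd (jptRM (jptRY t))))) = c :: jptRs (jptRm (jptRH (jptRd (jptRM (jptRY t))))) from
                      repK_skip _ _ _ _ (prefix2_lift 's' c t _ (by decide) h6' hX5)]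
termination_by l.length
decreasing_by all_goals (subst_vars; simp only [List.length_cons]; omega)


-- inside D_, the chain and the single pass ALWAYS differ
theorem jptChain_ne (l : List Char) (h : jptMRun l 0 = true) :
    jptChain l ≠ jptOnePass l := by
  cases l with
  | nil => rw [jptMRun] at h; exact absurd h (by simp)
  | cons c t =>
    by_cases h1 : List.isPrefixOf ['y','y','y','y'] (c :: t) = true
    · obtain ⟨u, rfl, rfl⟩ : ∃ u, c = 'y' ∧ t = 'y' :: 'y' :: 'y' :: u := by
        cases t with
        | nil => simp [List.isPrefixOf] at h1
        | cons a t' => cases t' with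
          | nil => simp [List.isPrefixOf] at h1
          | cons b t'' => cases t'' with
            | nil => simp [List.isPrefixOf] at h1
            | cons d t3 =>
              simp [List.isPrefixOf] at h1
              obtain ⟨e1, e2, e3, e4⟩ := h1
              exact ⟨t3, e1.symm, by rw [← e2, ← e3, ← e4]⟩
      have hu : jptMRun u 0 = true := by
        rw [jptMRun, jptMRun, jptMRun, jptMRun] at h
        simpa using h
      have ihne := jptChain_ne u hu
      rw [jptOnePass, if_pos h1]
      simp only [List.drop_succ_cons, List.drop_zero]
      unfold jptChain
      rw [show jptRY ('y' :: 'y' :: 'y' :: 'y' :: u) = '%' :: 'Y' :: jptRY u from by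
            unfold jptRY; rw [repK]; simp [List.isPrefixOf]]
      rw [show jptRM ('%' :: 'Y' :: jptRY u) = '%' :: 'Y' :: jptRM (jptRY u) from
            repK_skip2 _ _ _ _ _ _ (by decide) (by decide)]
      rw [show jptRd ('%' :: 'Y' :: jptRM (jptRY u)) = '%' :: 'Y' :: jptRd (jptRM (jptRY u)) from
            repK_skip2 _ _ _ _ _ _ (by decide) (by decide)]
      rw [show jptRH ('%' :: 'Y' :: jptRd (jptRM (jptRY u))) = '%' :: 'Y' :: jptRH (jptRd (jptRM (jptRY u))) from
            repK_skip2 _ _ _ _ _ _ (by decide) (by decide)]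
      rw [show jptRm ('%' :: 'Y' :: jptRH (jptRd (jptRM (jptRY u)))) = '%' :: 'Y' :: jptRm (jptRH (jptRd (jptRM (jptRY u)))) from
            repK_skip2 _ _ _ _ _ _ (by decide) (by decide)]
      rw [show jptRs ('%' :: 'Y' :: jptRm (jptRH (jptRd (jptRM (jptRY u))))) = '%' :: 'Y' :: jptRs (jptRm (jptRH (jptRd (jptRM (jptRY u))))) from
            repK_skip2 _ _ _ _ _ _ (by decide) (by decide)]
      exact fun heq => ihne (by unfold jptChain; simpa using heq)
    · by_cases h2 : List.isPrefixOf ['M','M'] (c :: t) = true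
      · obtain ⟨u, rfl, rfl⟩ : ∃ u, c = 'M' ∧ t = 'M' :: u := by
          cases t with
          | nil => simp [List.isPrefixOf] at h2
          | cons a t' =>
            simp [List.isPrefixOf] at h2
            obtain ⟨e1, e2⟩ := h2
            exact ⟨t', e1.symm, by rw [← e2]⟩
        have h2' : jptMRun u 2 = true := by
          rw [jptMRun, jptMRun] at h
          simpa using h
        by_cases hum : u.head? = some 'm'
        · -- the bad spot: A rewrites the emitted '%m' + 'm' into '%%M', B does not
          obtain ⟨v, rfl⟩ : ∃ v, u = 'm' :: v := by
            cases u with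
            | nil => simp at hum
            | cons d v => exact ⟨v, by injection hum with hd; rw [hd]⟩
          have hy4 : List.isPrefixOf ['y','y','y','y'] ('M' :: 'M' :: 'm' :: v) = false :=
            prefix_cons_ne _ _ _ _ (by decide)
          rw [jptOnePass, if_neg (by simp [hy4]), if_pos (by simp [List.isPrefixOf])]
          simp only [List.drop_succ_cons, List.drop_zero]
          unfold jptChain
          rw [show jptRY ('M' :: 'M' :: 'm' :: v) = 'M' :: 'M' :: 'm' :: jptRY v from by
                unfold jptRY
                rw [repK_skip2 _ _ _ _ _ _ (by decide) (by decide),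
                    show repK ['y','y','y','y'] ['%','Y'] ('m' :: v) = 'm' :: repK ['y','y','y','y'] ['%','Y'] v from
                      repK_skip _ _ _ _ (prefix_cons_ne _ _ _ _ (by decide))]]
          rw [show jptRM ('M' :: 'M' :: 'm' :: jptRY v) = '%' :: 'm' :: 'm' :: jptRM (jptRY v) from by
                unfold jptRM
                rw [repK2_match,
                    show repK ['M','M'] ['%','m'] ('m' :: jptRY v) = 'm' :: repK ['M','M'] ['%','m'] (jptRY v) from
                      repK_skip _ _ _ _ (prefix_cons_ne _ _ _ _ (by decide))]
                rfl]
          rw [show jptRd ('%' :: 'm' :: 'm' :: jptRM (jptRY v)) = '%' :: 'm' :: 'm' :: jptRd (jptRM (jptRY v)) from by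
                unfold jptRd
                rw [repK_skip2 _ _ _ _ _ _ (by decide) (by decide),
                    show repK ['d','d'] ['%','d'] ('m' :: jptRM (jptRY v)) = 'm' :: repK ['d','d'] ['%','d'] (jptRM (jptRY v)) from
                      repK_skip _ _ _ _ (prefix_cons_ne _ _ _ _ (by decide))]]
          rw [show jptRH ('%' :: 'm' :: 'm' :: jptRd (jptRM (jptRY v))) = '%' :: 'm' :: 'm' :: jptRH (jptRd (jptRM (jptRY v))) from by
                unfold jptRH
                rw [repK_skip2 _ _ _ _ _ _ (by decide) (by decide),
                    show repK ['H','H'] ['%','H'] ('m' :: jptRd (jptRM (jptRY v))) = 'm' :: repK ['H','H'] ['%','H'] (jptRd (jptRM (jptRY v))) from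
                      repK_skip _ _ _ _ (prefix_cons_ne _ _ _ _ (by decide))]]
          rw [show jptRm ('%' :: 'm' :: 'm' :: jptRH (jptRd (jptRM (jptRY v)))) = '%' :: '%' :: 'M' :: jptRm (jptRH (jptRd (jptRM (jptRY v)))) from by
                unfold jptRm
                rw [repK_skip _ _ _ _ (prefix_cons_ne _ _ _ _ (by decide)), repK2_match]
                rfl]
          rw [show jptRs ('%' :: '%' :: 'M' :: jptRm (jptRH (jptRd (jptRM (jptRY v))))) = '%' :: '%' :: 'M' :: jptRs (jptRm (jptRH (jptRd (jptRM (jptRY v))))) from by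
                unfold jptRs
                rw [repK_skip2 _ _ _ _ _ _ (by decide) (by decide),
                    show repK ['s','s'] ['%','S'] ('M' :: jptRm (jptRH (jptRd (jptRM (jptRY v))))) = 'M' :: repK ['s','s'] ['%','S'] (jptRm (jptRH (jptRd (jptRM (jptRY v))))) from
                      repK_skip _ _ _ _ (prefix_cons_ne _ _ _ _ (by decide))]]
          intro heq
          simp at heq
        · -- no 'm' after the pair: both emit '%m' and continue
          have hu : jptMRun u 0 = true := by rw [← jptMRun_two u hum]; exact h2'
          have hY : (jptRH (jptRd (jptRM (jptRY u)))).head? ≠ some 'm' :=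
            chain4_head_ne u 'm' (by decide) hum
          have ihne := jptChain_ne u hu
          rw [jptOnePass, if_neg h1, if_pos h2]
          simp only [List.drop_succ_cons, List.drop_zero]
          unfold jptChain
          rw [show jptRY ('M' :: 'M' :: u) = 'M' :: 'M' :: jptRY u from
                repK_skip2 _ _ _ _ _ _ (by decide) (by decide)]
          rw [show jptRM ('M' :: 'M' :: jptRY u) = '%' :: 'm' :: jptRM (jptRY u) from
                repK2_match _ _ _]
          rw [show jptRd ('%' :: 'm' :: jptRM (jptRY u)) = '%' :: 'm' :: jptRd (jptRM (jptRY u)) from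
                repK_skip2 _ _ _ _ _ _ (by decide) (by decide)]
          rw [show jptRH ('%' :: 'm' :: jptRd (jptRM (jptRY u))) = '%' :: 'm' :: jptRH (jptRd (jptRM (jptRY u))) from
                repK_skip2 _ _ _ _ _ _ (by decide) (by decide)]
          rw [show jptRm ('%' :: 'm' :: jptRH (jptRd (jptRM (jptRY u)))) = '%' :: 'm' :: jptRm (jptRH (jptRd (jptRM (jptRY u)))) from by
                unfold jptRm
                rw [repK_skip _ _ _ _ (prefix_cons_ne _ _ _ _ (by decide)),
                    repK2_skip_head _ _ _ hY]]
          rw [show jptRs ('%' :: 'm' :: jptRm (jptRH (jptRd (jptRM (jptRY u))))) = '%' :: 'm' :: jptRs (jptRm (jptRH (jptRd (jptRM (jptRY u))))) from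
                repK_skip2 _ _ _ _ _ _ (by decide) (by decide)]
          exact fun heq => ihne (by unfold jptChain; simpa using heq)
      · by_cases h3 : List.isPrefixOf ['d','d'] (c :: t) = true
        · obtain ⟨u, rfl, rfl⟩ : ∃ u, c = 'd' ∧ t = 'd' :: u := by
            cases t with
            | nil => simp [List.isPrefixOf] at h3
            | cons a t' =>
              simp [List.isPrefixOf] at h3
              obtain ⟨e1, e2⟩ := h3
              exact ⟨t', e1.symm, by rw [← e2]⟩
          have hu : jptMRun u 0 = true := by
            rw [jptMRun, jptMRun] at h
            simpa using h
          have ihne := jptChain_ne u hu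
          rw [jptOnePass, if_neg h1, if_neg h2, if_pos h3]
          simp only [List.drop_succ_cons, List.drop_zero]
          unfold jptChain
          rw [show jptRY ('d' :: 'd' :: u) = 'd' :: 'd' :: jptRY u from
                repK_skip2 _ _ _ _ _ _ (by decide) (by decide)]
          rw [show jptRM ('d' :: 'd' :: jptRY u) = 'd' :: 'd' :: jptRM (jptRY u) from
                repK_skip2 _ _ _ _ _ _ (by decide) (by decide)]
          rw [show jptRd ('d' :: 'd' :: jptRM (jptRY u)) = '%' :: 'd' :: jptRd (jptRM (jptRY u)) from
                repK2_match _ _ _]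
          rw [show jptRH ('%' :: 'd' :: jptRd (jptRM (jptRY u))) = '%' :: 'd' :: jptRH (jptRd (jptRM (jptRY u))) from
                repK_skip2 _ _ _ _ _ _ (by decide) (by decide)]
          rw [show jptRm ('%' :: 'd' :: jptRH (jptRd (jptRM (jptRY u)))) = '%' :: 'd' :: jptRm (jptRH (jptRd (jptRM (jptRY u)))) from
                repK_skip2 _ _ _ _ _ _ (by decide) (by decide)]
          rw [show jptRs ('%' :: 'd' :: jptRm (jptRH (jptRd (jptRM (jptRY u))))) = '%' :: 'd' :: jptRs (jptRm (jptRH (jptRd (jptRM (jptRY u))))) from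
                repK_skip2 _ _ _ _ _ _ (by decide) (by decide)]
          exact fun heq => ihne (by unfold jptChain; simpa using heq)
        · by_cases h4 : List.isPrefixOf ['H','H'] (c :: t) = true
          · obtain ⟨u, rfl, rfl⟩ : ∃ u, c = 'H' ∧ t = 'H' :: u := by
              cases t with
              | nil => simp [List.isPrefixOf] at h4
              | cons a t' =>
                simp [List.isPrefixOf] at h4
                obtain ⟨e1, e2⟩ := h4
                exact ⟨t', e1.symm, by rw [← e2]⟩
            have hu : jptMRun u 0 = true := by
              rw [jptMRun, jptMRun] at h
              simpa using h
            have ihne := jptChain_ne u hu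
            rw [jptOnePass, if_neg h1, if_neg h2, if_neg h3, if_pos h4]
            simp only [List.drop_succ_cons, List.drop_zero]
            unfold jptChain
            rw [show jptRY ('H' :: 'H' :: u) = 'H' :: 'H' :: jptRY u from
                  repK_skip2 _ _ _ _ _ _ (by decide) (by decide)]
            rw [show jptRM ('H' :: 'H' :: jptRY u) = 'H' :: 'H' :: jptRM (jptRY u) from
                  repK_skip2 _ _ _ _ _ _ (by decide) (by decide)]
            rw [show jptRd ('H' :: 'H' :: jptRM (jptRY u)) = 'H' :: 'H' :: jptRd (jptRM (jptRY u)) from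
                  repK_skip2 _ _ _ _ _ _ (by decide) (by decide)]
            rw [show jptRH ('H' :: 'H' :: jptRd (jptRM (jptRY u))) = '%' :: 'H' :: jptRH (jptRd (jptRM (jptRY u))) from
                  repK2_match _ _ _]
            rw [show jptRm ('%' :: 'H' :: jptRH (jptRd (jptRM (jptRY u)))) = '%' :: 'H' :: jptRm (jptRH (jptRd (jptRM (jptRY u)))) from
                  repK_skip2 _ _ _ _ _ _ (by decide) (by decide)]
            rw [show jptRs ('%' :: 'H' :: jptRm (jptRH (jptRd (jptRM (jptRY u))))) = '%' :: 'H' :: jptRs (jptRm (jptRH (jptRd (jptRM (jptRY u))))) from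
                  repK_skip2 _ _ _ _ _ _ (by decide) (by decide)]
            exact fun heq => ihne (by unfold jptChain; simpa using heq)
          · by_cases h5 : List.isPrefixOf ['m','m'] (c :: t) = true
            · obtain ⟨u, rfl, rfl⟩ : ∃ u, c = 'm' ∧ t = 'm' :: u := by
                cases t with
                | nil => simp [List.isPrefixOf] at h5
                | cons a t' =>
                  simp [List.isPrefixOf] at h5
                  obtain ⟨e1, e2⟩ := h5
                  exact ⟨t', e1.symm, by rw [← e2]⟩
              have hu : jptMRun u 0 = true := by
                rw [jptMRun, jptMRun] at h
                simpa using h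
              have ihne := jptChain_ne u hu
              rw [jptOnePass, if_neg h1, if_neg h2, if_neg h3, if_neg h4, if_pos h5]
              simp only [List.drop_succ_cons, List.drop_zero]
              unfold jptChain
              rw [show jptRY ('m' :: 'm' :: u) = 'm' :: 'm' :: jptRY u from
                    repK_skip2 _ _ _ _ _ _ (by decide) (by decide)]
              rw [show jptRM ('m' :: 'm' :: jptRY u) = 'm' :: 'm' :: jptRM (jptRY u) from
                    repK_skip2 _ _ _ _ _ _ (by decide) (by decide)]
              rw [show jptRd ('m' :: 'm' :: jptRM (jptRY u)) = 'm' :: 'm' :: jptRd (jptRM (jptRY u)) from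
                    repK_skip2 _ _ _ _ _ _ (by decide) (by decide)]
              rw [show jptRH ('m' :: 'm' :: jptRd (jptRM (jptRY u))) = 'm' :: 'm' :: jptRH (jptRd (jptRM (jptRY u))) from
                    repK_skip2 _ _ _ _ _ _ (by decide) (by decide)]
              rw [show jptRm ('m' :: 'm' :: jptRH (jptRd (jptRM (jptRY u)))) = '%' :: 'M' :: jptRm (jptRH (jptRd (jptRM (jptRY u)))) from
                    repK2_match _ _ _]
              rw [show jptRs ('%' :: 'M' :: jptRm (jptRH (jptRd (jptRM (jptRY u))))) = '%' :: 'M' :: jptRs (jptRm (jptRH (jptRd (jptRM (jptRY u))))) from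
                    repK_skip2 _ _ _ _ _ _ (by decide) (by decide)]
              exact fun heq => ihne (by unfold jptChain; simpa using heq)
            · by_cases h6 : List.isPrefixOf ['s','s'] (c :: t) = true
              · obtain ⟨u, rfl, rfl⟩ : ∃ u, c = 's' ∧ t = 's' :: u := by
                  cases t with
                  | nil => simp [List.isPrefixOf] at h6
                  | cons a t' =>
                    simp [List.isPrefixOf] at h6
                    obtain ⟨e1, e2⟩ := h6
                    exact ⟨t', e1.symm, by rw [← e2]⟩
                have hu : jptMRun u 0 = true := by
                  rw [jptMRun, jptMRun] at h
                  simpa using h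
                have ihne := jptChain_ne u hu
                rw [jptOnePass, if_neg h1, if_neg h2, if_neg h3, if_neg h4, if_neg h5, if_pos h6]
                simp only [List.drop_succ_cons, List.drop_zero]
                unfold jptChain
                rw [show jptRY ('s' :: 's' :: u) = 's' :: 's' :: jptRY u from
                      repK_skip2 _ _ _ _ _ _ (by decide) (by decide)]
                rw [show jptRM ('s' :: 's' :: jptRY u) = 's' :: 's' :: jptRM (jptRY u) from
                      repK_skip2 _ _ _ _ _ _ (by decide) (by decide)]
                rw [show jptRd ('s' :: 's' :: jptRM (jptRY u)) = 's' :: 's' :: jptRd (jptRM (jptRY u)) from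
                      repK_skip2 _ _ _ _ _ _ (by decide) (by decide)]
                rw [show jptRH ('s' :: 's' :: jptRd (jptRM (jptRY u))) = 's' :: 's' :: jptRH (jptRd (jptRM (jptRY u))) from
                      repK_skip2 _ _ _ _ _ _ (by decide) (by decide)]
                rw [show jptRm ('s' :: 's' :: jptRH (jptRd (jptRM (jptRY u)))) = 's' :: 's' :: jptRm (jptRH (jptRd (jptRM (jptRY u)))) from
                      repK_skip2 _ _ _ _ _ _ (by decide) (by decide)]
                rw [show jptRs ('s' :: 's' :: jptRm (jptRH (jptRd (jptRM (jptRY u))))) = '%' :: 'S' :: jptRs (jptRm (jptRH (jptRd (jptRM (jptRY u))))) from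
                      repK2_match _ _ _]
                exact fun heq => ihne (by unfold jptChain; simpa using heq)
              · have h1' : List.isPrefixOf ['y','y','y','y'] (c :: t) = false := by
                  rwa [Bool.not_eq_true] at h1
                have h2' : List.isPrefixOf ['M','M'] (c :: t) = false := by rwa [Bool.not_eq_true] at h2
                have h3' : List.isPrefixOf ['d','d'] (c :: t) = false := by rwa [Bool.not_eq_true] at h3
                have h4' : List.isPrefixOf ['H','H'] (c :: t) = false := by rwa [Bool.not_eq_true] at h4
                have h5' : List.isPrefixOf ['m','m'] (c :: t) = false := by rwa [Bool.not_eq_true] at h5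
                have h6' : List.isPrefixOf ['s','s'] (c :: t) = false := by rwa [Bool.not_eq_true] at h6
                have hu : jptMRun t 0 = true := by rw [← jptMRun_tail_eq c t h2']; exact h
                have hX1 := repK_head ['y','y','y','y'] '%' 'Y' t
                have hX2 : (jptRM (jptRY t)).head? = some '%' ∨ (jptRM (jptRY t)).head? = t.head? :=
                  head_or_trans (repK_head _ _ _ _) hX1
                have hX3 : (jptRd (jptRM (jptRY t))).head? = some '%' ∨ (jptRd (jptRM (jptRY t))).head? = t.head? :=
                  head_or_trans (repK_head _ _ _ _) hX2
                have hX4 : (jptRH (jptRd (jptRM (jptRY t)))).head? = some '%' ∨ (jptRH (jptRd (jptRM (jptRY t)))).head? = t.head? :=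
                  head_or_trans (repK_head _ _ _ _) hX3
                have hX5 : (jptRm (jptRH (jptRd (jptRM (jptRY t))))).head? = some '%' ∨ (jptRm (jptRH (jptRd (jptRM (jptRY t))))).head? = t.head? :=
                  head_or_trans (repK_head _ _ _ _) hX4
                have ihne := jptChain_ne t hu
                rw [jptOnePass, if_neg h1, if_neg h2, if_neg h3, if_neg h4, if_neg h5, if_neg h6]
                unfold jptChain
                rw [show jptRY (c :: t) = c :: jptRY t from repK_skip _ _ _ _ h1']
                rw [show jptRM (c :: jptRY t) = c :: jptRM (jptRY t) from
                      repK_skip _ _ _ _ (prefix2_lift 'M' c t _ (by decide) h2' hX1)]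
                rw [show jptRd (c :: jptRM (jptRY t)) = c :: jptRd (jptRM (jptRY t)) from
                      repK_skip _ _ _ _ (prefix2_lift 'd' c t _ (by decide) h3' hX2)]
                rw [show jptRH (c :: jptRd (jptRM (jptRY t))) = c :: jptRH (jptRd (jptRM (jptRY t))) from
                      repK_skip _ _ _ _ (prefix2_lift 'H' c t _ (by decide) h4' hX3)]
                rw [show jptRm (c :: jptRH (jptRd (jptRM (jptRY t)))) = c :: jptRm (jptRH (jptRd (jptRM (jptRY t)))) from
                      repK_skip _ _ _ _ (prefix2_lift 'm' c t _ (by decide) h5' hX4)]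
                rw [show jptRs (c :: jptRm (jptRH (jptRd (jptRM (jptRY t))))) = c :: jptRs (jptRm (jptRH (jptRd (jptRM (jptRY t))))) from
                      repK_skip _ _ _ _ (prefix2_lift 's' c t _ (by decide) h6' hX5)]
                exact fun heq => ihne (by unfold jptChain; simpa using heq)
termination_by l.length
decreasing_by all_goals (subst_vars; simp only [List.length_cons]; omega)

-- A's port really is the six-pass chain
theorem A_eq_chain (s : String) :
    java_to_python_date_format_py s = String.ofList (jptChain s.toList) := by
  have step : ∀ (l : List Char) (o n : String), o.toList ≠ [] →
      PySem.Str.replace (String.ofList l) o n = String.ofList (repK o.toList n.toList l) := by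
    intro l o n ho
    show String.ofList (PySem.Chars.replace (String.ofList l).toList o.toList n.toList) = _
    rw [String.toList_ofList, replace_eq_repK _ _ _ ho]
  have first : PySem.Str.replace s "yyyy" "%Y" = String.ofList (repK ['y','y','y','y'] ['%','Y'] s.toList) := by
    show String.ofList (PySem.Chars.replace s.toList "yyyy".toList "%Y".toList) = _
    rw [replace_eq_repK _ _ _ (by decide)]
    rfl
  show List.foldl (fun result p => PySem.Str.replace result p.1 p.2) s
        (PySem.Dict.ofList [("yyyy", "%Y"), ("MM", "%m"), ("dd", "%d"), ("HH", "%H"), ("mm", "%M"), ("ss", "%S")]).items = _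
  rw [show (PySem.Dict.ofList [("yyyy", "%Y"), ("MM", "%m"), ("dd", "%d"), ("HH", "%H"), ("mm", "%M"), ("ss", "%S")]).items
        = [("yyyy", "%Y"), ("MM", "%m"), ("dd", "%d"), ("HH", "%H"), ("mm", "%M"), ("ss", "%S")] from rfl]
  simp only [List.foldl]
  rw [first, step _ _ _ (by decide), step _ _ _ (by decide), step _ _ _ (by decide),
      step _ _ _ (by decide), step _ _ _ (by decide)]
  rfl

-- ===== VERDICT (by name: the statement is the Claim_ definition above) =====
theorem java_to_python_date_format_py_spec : Claim_unchanged_java_to_python_date_format_py := by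
  intro s _ hD
  have hF : jptMRun s.toList 0 = false := by
    unfold D_java_to_python_date_format_py at hD
    exact Bool.eq_false_iff.mpr (fun hc => hD hc)
  rw [A_eq_chain]
  show String.ofList (jptChain s.toList) = String.ofList (jptOnePass s.toList)
  exact congrArg _ (jptChain_eq_onePass _ hF)

theorem java_to_python_date_format_py_changed : Claim_changed_java_to_python_date_format_py := by
  unfold Claim_changed_java_to_python_date_format_py
  refine ⟨by decide, by decide, ?_, ?_, by decide⟩
  · rw [A_eq_chain]
    show String.ofList (jptChain ['M','M','m']) = "%%M"
    rw [show jptChain ['M','M','m'] = ['%','%','M'] from by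
          simp [jptChain, jptRY, jptRM, jptRd, jptRH, jptRm, jptRs, repK, List.isPrefixOf]]
  · show String.ofList (jptOnePass ['M','M','m']) = "%mm"
    rw [show jptOnePass ['M','M','m'] = ['%','m','m'] from by
          simp [jptOnePass, List.isPrefixOf]]

theorem java_to_python_date_format_py_tight : Claim_exact_java_to_python_date_format_py := by
  intro s _ hD hEq
  have hT : jptMRun s.toList 0 = true := hD
  rw [A_eq_chain] at hEq
  unfold java_to_python_date_format_py_alt at hEq
  have hlists : jptChain s.toList = jptOnePass s.toList := by
    have := congrArg String.toList hEq
    simpa using this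
  exact jptChain_ne s.toList hT hlists
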